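-- pv_equiv track=rewrite | github.com/HyunJunCho00/finance_telegram_bot | collectors/dune_sanitizer.py | sanitize_dune_rows
-- ===== SOURCE A (Python) =====
-- from typing import Any
--
-- EXACT_DROP_KEYS = {
--     "open",
--     "high",
--     "low",
--     "close",
--     "price",
--     "eth_price",
--     "btc_price",
--     "open_price",
--     "high_price",
--     "low_price",
--     "close_price",
-- }
--
-- def _should_drop_key(key: str) -> bool:
--     k = key.strip().lower().replace(" ", "_")
--     if k in EXACT_DROP_KEYS:
--         return True
--
--     # Drop generic OHLC-like variations while keeping non-price signals.
--     parts = set(k.split("_"))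
--     if {"open", "high", "low", "close"}.issubset(parts):
--         return True
--     if "price" in parts and ("eth" in parts or "btc" in parts or len(parts) <= 2):
--         return True
--     return False
--
-- def sanitize_dune_rows(rows: list[dict[str, Any]]) -> tuple[list[dict[str, Any]], list[str]]:
--     dropped: set[str] = set()
--     sanitized: list[dict[str, Any]] = []
--
--     for row in rows:
--         clean_row: dict[str, Any] = {}
--         for key, value in row.items():
--             if _should_drop_key(key):
--                 dropped.add(key)
--                 continue
--             clean_row[key] = value
--         sanitized.append(clean_row)
--
--     return sanitized, sorted(dropped)
-- ===== SOURCE B (Python) =====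
-- EXACT_DROP_KEYS = {
--     "open",
--     "high",
--     "low",
--     "close",
--     "price",
--     "eth_price",
--     "btc_price",
--     "open_price",
--     "high_price",
--     "low_price",
--     "close_price",
-- }
--
-- def _should_drop_key(key: str) -> bool:
--     k = key.strip().lower().replace(" ", "_")
--     if k in EXACT_DROP_KEYS:
--         return True
--     parts = set(k.split("_"))
--     if {"open", "high", "low", "close"}.issubset(parts):
--         return True
--     if "price" in parts and ("eth" in parts or "btc" in parts or len(parts) <= 2):
--         return True
--     return False
--
-- def sanitize_dune_rows(rows):
--     # pass 1: the full index of droppable keys, one predicate call per cell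
--     dropped = {k for row in rows for k in row if _should_drop_key(k)}
--     # pass 2: rebuild every row with a cheap set-membership filter
--     sanitized = [{k: v for k, v in row.items() if k not in dropped} for row in rows]
--     return sanitized, sorted(dropped)
-- ===== Notes on version B (the rewrite author's own statement) =====
-- stated objective: idiomatic
-- what changed: Two-pass decomposition: first build the set of droppable keys with a set comprehension over all rows, then rebuild rows as dict comprehensions filtered by set membership, instead of one interleaved loop that mutates a dict and a set per cell.
import Mathlib
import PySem

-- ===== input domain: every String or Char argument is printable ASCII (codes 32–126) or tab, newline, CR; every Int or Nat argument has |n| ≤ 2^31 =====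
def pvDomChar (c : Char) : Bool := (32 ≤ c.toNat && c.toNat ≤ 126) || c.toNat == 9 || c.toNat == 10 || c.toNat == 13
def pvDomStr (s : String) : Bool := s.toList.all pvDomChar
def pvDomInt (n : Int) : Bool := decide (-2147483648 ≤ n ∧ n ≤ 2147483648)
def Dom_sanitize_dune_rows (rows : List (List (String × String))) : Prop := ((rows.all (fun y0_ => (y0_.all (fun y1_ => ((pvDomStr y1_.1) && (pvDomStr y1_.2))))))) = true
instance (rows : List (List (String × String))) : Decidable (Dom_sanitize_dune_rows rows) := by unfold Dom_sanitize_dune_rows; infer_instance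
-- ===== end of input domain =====

-- B re-decomposes A's single interleaved loop into two passes (dropped-key index build, then
-- membership-filtered row rebuild); return value only, same complexity (objective: idiomatic).

-- ===== PORT A =====
-- shared module helper _should_drop_key (used verbatim by both Pythons)
def exactDropKeys : PySem.Set String :=
  PySem.Set.ofList ["open", "high", "low", "close", "price", "eth_price", "btc_price",
    "open_price", "high_price", "low_price", "close_price"]

def shouldDropKey (key : String) : Bool :=
  let k := PySem.Str.replace (PySem.Str.lower (PySem.Str.strip key)) " " "_"
  if PySem.Set.contains exactDropKeys k then true
  else
    let parts : PySem.Set String := PySem.Set.ofList ((PySem.Str.split? k "_").getD [])  -- split? is none only for an empty separator; "_" is non-empty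
    if PySem.Set.issubset (PySem.Set.ofList ["open", "high", "low", "close"]) parts then true
    else if PySem.Set.contains parts "price" &&
        (PySem.Set.contains parts "eth" || PySem.Set.contains parts "btc" ||
          PySem.Set.len parts ≤ 2) then true
    else false

def sanitize_dune_rows (rows : List (List (String × String))) : (List (List (String × String))) × List String :=
  let st := rows.foldl
    (fun (st : PySem.Set String × List (List (String × String))) row =>
      let p := row.foldl
        (fun (p : PySem.Set String × PySem.Dict String String) kv =>
          if shouldDropKey kv.1 then (PySem.Set.add p.1 kv.1, p.2)
          else (p.1, p.2.insert kv.1 kv.2))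
        (st.1, PySem.Dict.empty)
      (p.1, st.2 ++ [p.2.items]))
    (PySem.Set.empty, [])
  (st.2, PySem.List.sorted st.1 (fun x => x) false)

-- ===== PORT B =====
def sanitize_dune_rows_alt (rows : List (List (String × String))) : (List (List (String × String))) × List String :=
  let dropped : PySem.Set String := rows.foldl
    (fun s row => row.foldl
      (fun (s : PySem.Set String) kv => if shouldDropKey kv.1 then PySem.Set.add s kv.1 else s) s)
    PySem.Set.empty
  let sanitized := rows.map (fun row =>
    (row.foldl
      (fun (d : PySem.Dict String String) kv =>
        if PySem.Set.contains dropped kv.1 then d else d.insert kv.1 kv.2)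
      PySem.Dict.empty).items)
  (sanitized, PySem.List.sorted dropped (fun x => x) false)

-- ===== PRECONDITION & SPEC =====
def Spec_sanitize_dune_rows (rows : List (List (String × String))) (out : (List (List (String × String))) × List String) : Prop := out = sanitize_dune_rows_alt rows
instance (rows : List (List (String × String))) (out : (List (List (String × String))) × List String) : Decidable (Spec_sanitize_dune_rows rows out) := by unfold Spec_sanitize_dune_rows; infer_instance

-- ===== CLAIM (what is proved, stated in full; the proofs are below) =====
def Claim_equal_sanitize_dune_rows : Prop := ∀ (rows : List (List (String × String))), Dom_sanitize_dune_rows rows → Spec_sanitize_dune_rows rows (sanitize_dune_rows rows)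

-- ===== LEMMAS AND PROOFS =====

-- per-row set-accumulation step of both ports
def stepSet (s : PySem.Set String) (kv : String × String) : PySem.Set String :=
  if shouldDropKey kv.1 then PySem.Set.add s kv.1 else s

-- per-row dict build with the predicate (the computation A's inner loop performs on the dict side)
def stepPred (d : PySem.Dict String String) (kv : String × String) : PySem.Dict String String :=
  if shouldDropKey kv.1 then d else d.insert kv.1 kv.2

-- A's inner pair-fold projects to the two independent folds
theorem innerA_eq (row : List (String × String)) :
    ∀ (s : PySem.Set String) (d : PySem.Dict String String),
      row.foldl
        (fun (p : PySem.Set String × PySem.Dict String String) kv =>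
          if shouldDropKey kv.1 then (PySem.Set.add p.1 kv.1, p.2)
          else (p.1, p.2.insert kv.1 kv.2)) (s, d)
      = (row.foldl stepSet s, row.foldl stepPred d) := by
  induction row with
  | nil => intro s d; rfl
  | cons kv rest ih =>
      intro s d
      rw [List.foldl_cons, List.foldl_cons, List.foldl_cons]
      by_cases h : shouldDropKey kv.1 = true
      · rw [if_pos h, stepSet, if_pos h, stepPred, if_pos h, ih]
      · rw [if_neg h, stepSet, if_neg h, stepPred, if_neg h, ih]

-- the projected outer fold = (B's dropped fold, accumulator ++ map of per-row predicate dicts)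
theorem outerG_eq (rows : List (List (String × String))) :
    ∀ (s : PySem.Set String) (acc : List (List (String × String))),
      rows.foldl
        (fun (st : PySem.Set String × List (List (String × String))) row =>
          (row.foldl stepSet st.1, st.2 ++ [(row.foldl stepPred PySem.Dict.empty).items]))
        (s, acc)
      = (rows.foldl (fun s row => row.foldl stepSet s) s,
         acc ++ rows.map (fun row => (row.foldl stepPred PySem.Dict.empty).items)) := by
  induction rows with
  | nil => intro s acc; simp
  | cons row rest ih =>
      intro s acc
      simp only [List.foldl_cons, List.map_cons]
      rw [ih]
      simp [List.append_assoc]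

-- membership in the set fold over one row
theorem mem_foldl_stepSet (row : List (String × String)) :
    ∀ (s : PySem.Set String) (k : String),
      k ∈ row.foldl stepSet s ↔ k ∈ s ∨ (shouldDropKey k = true ∧ ∃ v, (k, v) ∈ row) := by
  induction row with
  | nil => intro s k; simp
  | cons kv rest ih =>
      intro s k
      rw [List.foldl_cons, ih]
      by_cases h : shouldDropKey kv.1 = true
      · rw [stepSet, if_pos h, PySem.Set.mem_add]
        constructor
        · rintro (⟨hs | rfl⟩ | ⟨hp, v, hv⟩)
          · exact Or.inl hs
          · exact Or.inr ⟨h, kv.2, by simp⟩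
          · exact Or.inr ⟨hp, v, List.mem_cons_of_mem _ hv⟩
        · rintro (hs | ⟨hp, v, hv⟩)
          · exact Or.inl (Or.inl hs)
          · rcases List.mem_cons.mp hv with hv | hv
            · exact Or.inl (Or.inr (congrArg Prod.fst hv))
            · exact Or.inr ⟨hp, v, hv⟩
      · rw [stepSet, if_neg h]
        constructor
        · rintro (hs | ⟨hp, v, hv⟩)
          · exact Or.inl hs
          · exact Or.inr ⟨hp, v, List.mem_cons_of_mem _ hv⟩
        · rintro (hs | ⟨hp, v, hv⟩)
          · exact Or.inl hs
          · rcases List.mem_cons.mp hv with hv | hv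
            · exact absurd ((congrArg Prod.fst hv) ▸ hp) h
            · exact Or.inr ⟨hp, v, hv⟩

-- membership in the full dropped set
theorem mem_dropped (rows : List (List (String × String))) :
    ∀ (s : PySem.Set String) (k : String),
      k ∈ rows.foldl (fun s row => row.foldl stepSet s) s ↔
        k ∈ s ∨ (shouldDropKey k = true ∧ ∃ row ∈ rows, ∃ v, (k, v) ∈ row) := by
  induction rows with
  | nil => intro s k; simp
  | cons row rest ih =>
      intro s k
      rw [List.foldl_cons, ih, mem_foldl_stepSet]
      constructor
      · rintro (⟨hs | ⟨hp, v, hv⟩⟩ | ⟨hp, r, hr, v, hv⟩)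
        · exact Or.inl hs
        · exact Or.inr ⟨hp, row, by simp, v, hv⟩
        · exact Or.inr ⟨hp, r, List.mem_cons_of_mem _ hr, v, hv⟩
      · rintro (hs | ⟨hp, r, hr, v, hv⟩)
        · exact Or.inl (Or.inl hs)
        · rcases List.mem_cons.mp hr with rfl | hr
          · exact Or.inl (Or.inr ⟨hp, v, hv⟩)
          · exact Or.inr ⟨hp, r, hr, v, hv⟩

-- inside a row of rows, membership in the dropped set decides exactly the predicate
theorem contains_dropped (rows : List (List (String × String)))
    (row : List (String × String)) (hrow : row ∈ rows) (kv : String × String) (hkv : kv ∈ row) :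
    PySem.Set.contains (rows.foldl (fun s row => row.foldl stepSet s) PySem.Set.empty) kv.1
      = shouldDropKey kv.1 := by
  by_cases h : shouldDropKey kv.1 = true
  · rw [h]
    refine (PySem.Set.contains_iff _ _).mpr ?_
    rw [mem_dropped]
    exact Or.inr ⟨h, row, hrow, kv.2, by simpa using hkv⟩
  · rw [Bool.eq_false_iff.mpr h, Bool.eq_false_iff]
    intro hc
    have hm := (PySem.Set.contains_iff _ _).mp hc
    rw [mem_dropped] at hm
    rcases hm with hs | ⟨hp, _⟩
    · exact absurd hs (by simp [PySem.Set.empty])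
    · exact h hp

-- one row rebuilt by membership test = the predicate rebuild
theorem rowB_eq_rowPred (rows : List (List (String × String)))
    (row : List (String × String)) (hrow : row ∈ rows) :
    row.foldl
      (fun (d : PySem.Dict String String) kv =>
        if PySem.Set.contains (rows.foldl (fun s row => row.foldl stepSet s) PySem.Set.empty) kv.1
        then d else d.insert kv.1 kv.2)
      PySem.Dict.empty
    = row.foldl stepPred PySem.Dict.empty := by
  apply PySem.List.foldl_congr_mem
  intro d kv hkv
  rw [contains_dropped rows row hrow kv hkv, stepPred]

-- ===== VERDICT (by name: the statement is the Claim_ definition above) =====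
theorem sanitize_dune_rows_spec : Claim_equal_sanitize_dune_rows := by
  intro rows _
  show sanitize_dune_rows rows = sanitize_dune_rows_alt rows
  unfold sanitize_dune_rows sanitize_dune_rows_alt
  simp only [innerA_eq]
  rw [outerG_eq]
  simp only [List.nil_append]
  refine Prod.ext ?_ rfl
  apply List.map_congr_left
  intro row hrow
  exact (congrArg PySem.Dict.items (rowB_eq_rowPred rows row hrow)).symm
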